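-- pv_equiv track=rewrite | github.com/emarberg/schurp | keys.py | maximal_weakly_increasing_factors
-- ===== SOURCE A (Python) =====
-- def maximal_weakly_increasing_factors(w):
--     factors = [[]]
--     for a in w:
--         if len(factors[-1]) == 0 or factors[-1][-1] <= a:
--             factors[-1].append(a)
--         else:
--             factors.append([a])
--     return tuple(tuple(a) for a in factors)
-- ===== SOURCE B (Python) =====
-- def maximal_weakly_increasing_factors(w):
--     # Build the runs back-to-front: scan w in reverse and prepend each element
--     # either onto the current first run (if it keeps it weakly increasing) or as
--     # a new run in front.
--     runs = []
--     for a in reversed(list(w)):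
--         if runs and a <= runs[0][0]:
--             runs[0] = (a,) + runs[0]
--         else:
--             runs.insert(0, (a,))
--     return tuple(runs) if runs else ((),)
-- ===== Notes on version B (the rewrite author's own statement) =====
-- stated objective: alternative
-- what changed: B builds the run decomposition back-to-front: it scans the sequence in reverse and prepends each element onto the first run or starts a new first run, instead of A's forward loop that grows the last run element-by-element.
import Mathlib
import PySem

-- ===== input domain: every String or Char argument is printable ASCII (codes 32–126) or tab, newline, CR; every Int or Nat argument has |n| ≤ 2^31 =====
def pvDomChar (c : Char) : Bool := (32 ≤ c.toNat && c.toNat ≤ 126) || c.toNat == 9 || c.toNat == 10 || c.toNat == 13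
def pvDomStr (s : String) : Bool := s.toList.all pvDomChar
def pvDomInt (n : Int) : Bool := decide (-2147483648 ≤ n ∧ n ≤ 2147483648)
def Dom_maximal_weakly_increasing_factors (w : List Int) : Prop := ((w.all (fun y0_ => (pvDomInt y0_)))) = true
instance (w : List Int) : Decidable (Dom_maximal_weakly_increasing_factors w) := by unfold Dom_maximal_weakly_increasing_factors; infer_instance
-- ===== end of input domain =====

-- B builds the run decomposition back-to-front (reverse scan, prepending), instead of A's forward loop growing the last run; objective: alternative decomposition, same result.


-- ===== PORT A =====
-- one loop step of A: append a to the last factor, or start a new factor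
def pvStepA (factors : List (List Int)) (a : Int) : List (List Int) :=
  match factors.getLast? with
  | none => factors  -- unreachable: factors starts as [[]]
  | some last =>
    match last.getLast? with
    | none => factors.dropLast ++ [last ++ [a]]          -- len(factors[-1]) == 0
    | some x =>
      if x ≤ a then factors.dropLast ++ [last ++ [a]]    -- factors[-1][-1] <= a
      else factors ++ [[a]]

def maximal_weakly_increasing_factors (w : List Int) : List (List Int) :=
  w.foldl pvStepA [[]]

-- ===== PORT B =====
-- one reverse-scan step of B: prepend a onto the first run, or start a new first run
def pvStepB (runs : List (List Int)) (a : Int) : List (List Int) :=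
  match runs with
  | (b :: bs) :: t => if a ≤ b then (a :: b :: bs) :: t else [a] :: (b :: bs) :: t
  | _ => [a] :: runs

def maximal_weakly_increasing_factors_alt (w : List Int) : List (List Int) :=
  let r := w.reverse.foldl pvStepB []
  if r = [] then [[]] else r

-- ===== PRECONDITION & SPEC =====
def Spec_maximal_weakly_increasing_factors (w : List Int) (out : List (List Int)) : Prop := out = maximal_weakly_increasing_factors_alt w
instance (w : List Int) (out : List (List Int)) : Decidable (Spec_maximal_weakly_increasing_factors w out) := by unfold Spec_maximal_weakly_increasing_factors; infer_instance

-- ===== CLAIM (what is proved, stated in full; the proofs are below) =====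
def Claim_equal_maximal_weakly_increasing_factors : Prop := ∀ (w : List Int), Dom_maximal_weakly_increasing_factors w → Spec_maximal_weakly_increasing_factors w (maximal_weakly_increasing_factors w)

-- ===== LEMMAS AND PROOFS =====

-- canonical recursion: the runs of w given the current (in-progress) run l
def pvRuns (l : List Int) : List Int → List (List Int)
  | [] => [l]
  | a :: w =>
    match l.getLast? with
    | none => pvRuns (l ++ [a]) w
    | some x => if x ≤ a then pvRuns (l ++ [a]) w else l :: pvRuns [a] w

theorem pvRuns_ne_nil (w : List Int) (l : List Int) : pvRuns l w ≠ [] := by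
  induction w generalizing l with
  | nil => simp [pvRuns]
  | cons a w ih =>
    simp only [pvRuns]
    cases h : l.getLast? with
    | none => exact ih _
    | some x =>
      by_cases hx : x ≤ a
      · simp [hx]; exact ih _
      · simp [hx]

-- A's foldl with accumulator fs ++ [l] is fs ++ pvRuns l w
theorem pvFoldA (w : List Int) (fs : List (List Int)) (l : List Int) :
    w.foldl pvStepA (fs ++ [l]) = fs ++ pvRuns l w := by
  induction w generalizing fs l with
  | nil => simp [pvRuns]
  | cons a w ih =>
    simp only [List.foldl_cons, pvStepA, pvRuns, List.getLast?_concat, List.dropLast_concat]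
    cases h : l.getLast? with
    | none => exact ih fs (l ++ [a])
    | some x =>
      by_cases hx : x ≤ a
      · simp only [hx, if_true]
        exact ih fs (l ++ [a])
      · simp only [hx, if_false]
        have := ih (fs ++ [l]) [a]
        rw [this]
        simp

-- prepending a to a nonempty current run prepends a to the head run of the result
theorem pvRuns_cons (w : List Int) (l : List Int) (a : Int) (hl : l ≠ []) :
    ∃ h t, pvRuns l w = h :: t ∧ pvRuns (a :: l) w = (a :: h) :: t := by
  induction w generalizing l a with
  | nil => exact ⟨l, [], rfl, rfl⟩
  | cons c w ih =>
    obtain ⟨x, hx⟩ : ∃ x, l.getLast? = some x := by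
      cases l with
      | nil => exact absurd rfl hl
      | cons y ys => exact ⟨(y :: ys).getLast (by simp), List.getLast?_eq_some_getLast (by simp)⟩
    have hax : (a :: l).getLast? = some x := by
      rw [show a :: l = [a] ++ l from rfl, List.getLast?_append_of_ne_nil _ hl, hx]
    simp only [pvRuns, hx, hax]
    by_cases hc : x ≤ c
    · simp only [hc, if_true]
      exact ih (l ++ [c]) a (by simp)
    · simp only [hc, if_false]
      exact ⟨l, pvRuns [c] w, rfl, rfl⟩

-- the head run of pvRuns l w starts with l (nonempty l)
theorem pvRuns_head (w : List Int) (l : List Int) (hl : l ≠ []) :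
    ∃ t rest, pvRuns l w = (l ++ t) :: rest := by
  induction w generalizing l with
  | nil => exact ⟨[], [], by simp [pvRuns]⟩
  | cons a w ih =>
    obtain ⟨x, hx⟩ : ∃ x, l.getLast? = some x := by
      cases l with
      | nil => exact absurd rfl hl
      | cons y ys => exact ⟨(y :: ys).getLast (by simp), List.getLast?_eq_some_getLast (by simp)⟩
    simp only [pvRuns, hx]
    by_cases hc : x ≤ a
    · simp only [hc, if_true]
      obtain ⟨t, rest, h⟩ := ih (l ++ [a]) (by simp)
      exact ⟨[a] ++ t, rest, by simpa using h⟩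
    · simp only [hc, if_false]
      exact ⟨[], pvRuns [a] w, by simp⟩

-- B's foldr step applied to the whole result equals pvRuns with a one-element run
theorem pvFoldB (w : List Int) (a : Int) :
    pvStepB (w.foldr (fun x y => pvStepB y x) []) a = pvRuns [a] w := by
  induction w generalizing a with
  | nil => rfl
  | cons b w ih =>
    simp only [List.foldr_cons, ih b]
    obtain ⟨t, rest, h⟩ := pvRuns_head w [b] (by simp)
    have hruns : pvRuns [b] w = (b :: t) :: rest := by simpa using h
    rw [hruns]
    simp only [pvStepB, pvRuns, List.getLast?_singleton, List.singleton_append]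
    by_cases hab : a ≤ b
    · simp only [hab, if_true]
      obtain ⟨h', t', h1, h2⟩ := pvRuns_cons w [b] a (by simp)
      rw [hruns] at h1
      cases h1
      exact h2.symm
    · simp only [hab, if_false]
      rw [hruns]

-- ===== VERDICT (by name: the statement is the Claim_ definition above) =====
theorem maximal_weakly_increasing_factors_spec : Claim_equal_maximal_weakly_increasing_factors := by
  intro w _
  show w.foldl pvStepA [[]] = maximal_weakly_increasing_factors_alt w
  have hA : w.foldl pvStepA [[]] = pvRuns [] w := by
    have := pvFoldA w [] []
    simpa using this
  unfold maximal_weakly_increasing_factors_alt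
  rw [List.foldl_reverse]
  cases w with
  | nil => simp [hA, pvRuns]
  | cons a w =>
    have hB : (a :: w).foldr (fun x y => pvStepB y x) [] = pvRuns [a] w := by
      simpa using pvFoldB w a
    have hne : pvRuns [a] w ≠ [] := pvRuns_ne_nil w [a]
    rw [hA, hB]
    simp only [pvRuns, List.getLast?_nil, List.nil_append, if_neg hne]
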